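-- pv_equiv track=rewrite | github.com/niranjan-nagaraju/Development | python/interviewbit/two_pointers/max_consecutive_series_of_1s/max_consecutive_series_of_1s.py | find_max_consecutives_1s
-- ===== SOURCE A (Python) =====
-- def find_max_consecutives_1s(A, M):
-- 	sow = 0 # start of window
-- 	eow = -1 # end of window
--
-- 	max_sow = max_eow = 0
-- 	for x in A:
-- 		eow += 1
-- 		if x == 0:
-- 			if M == 0:
-- 				# Ran out of 0s to add in the current window
-- 				# Check if max window (excluding newly added 0), is the maximum by size
-- 				if (max_eow-max_sow) < (eow-sow):
-- 					max_sow,max_eow = sow, eow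
--
-- 				# Shrink window by advancing start of window to exclude the first 0 in the window
-- 				while A[sow] != 0:
-- 					sow += 1
-- 				sow += 1
-- 			else:
-- 				# Added a 0 to the current window
-- 				M -= 1
--
-- 	# End of the pass,
-- 	# Check if the last window is bigger than the
-- 	# maximum window seen so far
-- 	if (max_eow-max_sow) < (eow-sow+1):
-- 		return range(sow, eow+1)
--
-- 	return range(max_sow, max_eow)
-- ===== SOURCE B (Python) =====
-- def find_max_consecutives_1s(A, M):
--     # Slide over the zero-index list instead of scanning element by element:
--     # each candidate window contains exactly M zeros (bounded by the
--     # surrounding zeros / array ends); keep the earliest strictly-largest one.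
--     n = len(A)
--     Z = [i for i, x in enumerate(A) if x == 0]
--     k = len(Z)
--     if M < 0 or k <= M:
--         return range(0, n)
--     best_left, best_right = 0, -1
--     for j in range(k - M + 1):
--         left = 0 if j == 0 else Z[j - 1] + 1
--         right = n - 1 if j + M >= k else Z[j + M] - 1
--         if best_right - best_left < right - left:
--             best_left, best_right = left, right
--     return range(best_left, best_right + 1)
-- ===== Notes on version B (the rewrite author's own statement) =====
-- stated objective: alternative
-- what changed: Instead of A's per-element sliding window with an inner rescan that re-finds the first zero of the window, B collects the zero indices once and slides a window of exactly M consecutive zeros over that index list, keeping the earliest strictly largest window.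
import Mathlib
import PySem

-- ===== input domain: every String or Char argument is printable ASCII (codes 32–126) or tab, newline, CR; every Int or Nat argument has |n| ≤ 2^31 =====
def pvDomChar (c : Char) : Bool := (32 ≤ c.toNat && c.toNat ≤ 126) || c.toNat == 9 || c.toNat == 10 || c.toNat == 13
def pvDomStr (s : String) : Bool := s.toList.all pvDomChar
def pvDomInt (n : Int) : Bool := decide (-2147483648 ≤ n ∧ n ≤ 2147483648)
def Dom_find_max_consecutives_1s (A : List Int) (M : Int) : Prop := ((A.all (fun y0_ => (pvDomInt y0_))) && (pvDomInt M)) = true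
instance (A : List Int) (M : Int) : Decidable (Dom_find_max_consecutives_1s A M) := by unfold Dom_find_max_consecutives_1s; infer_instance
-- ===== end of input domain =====

-- B replaces A's per-element sliding window (with an inner rescan for the first
-- zero of the window) by a single pass over the list of zero indices.

-- ===== PORT A =====
-- 'while A[sow] != 0: sow += 1; sow += 1' — fuel-bounded scan; A.length fuel is
-- always enough because the loop stops at the zero just appended to the window
-- (the index stays in range on every input, so pyGetD is exact here).
def pvAdvance (A : List Int) : Nat → Int → Int
  | 0, sow => sow + 1
  | fuel + 1, sow =>
      if PySem.List.pyGetD A sow 0 ≠ 0 then pvAdvance A fuel (sow + 1) else sow + 1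

-- one iteration of A's 'for x in A' loop; state = (sow, eow, max_sow, max_eow, M)
def pvStepA (A : List Int) (st : Int × Int × Int × Int × Int) (x : Int) :
    Int × Int × Int × Int × Int :=
  match st with
  | (sow, eow, msow, meow, m) =>
    let eow := eow + 1
    if x = 0 then
      if m = 0 then
        let p := if meow - msow < eow - sow then (sow, eow) else (msow, meow)
        (pvAdvance A A.length sow, eow, p.1, p.2, m)
      else
        (sow, eow, msow, meow, m - 1)
    else
      (sow, eow, msow, meow, m)

def find_max_consecutives_1s (A : List Int) (M : Int) : List Int :=
  match A.foldl (fun st x => pvStepA A st x) (0, -1, 0, 0, M) with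
  | (sow, eow, msow, meow, _) =>
    if meow - msow < eow - sow + 1 then PySem.List.pyRange sow (eow + 1) 1
    else PySem.List.pyRange msow meow 1

-- ===== PORT B =====
-- Z = [i for i, x in enumerate(A) if x == 0]
def pvZerosOf (A : List Int) : List Int :=
  (PySem.List.enumerate A 0).filterMap (fun p => if p.2 = 0 then some p.1 else none)

def find_max_consecutives_1s_alt (A : List Int) (M : Int) : List Int :=
  let n : Int := A.length
  let Z : List Int := pvZerosOf A
  let k : Int := Z.length
  if M < 0 ∨ k ≤ M then PySem.List.pyRange 0 n 1
  else
    let bp := (PySem.List.pyRange 0 (k - M + 1) 1).foldl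
      (fun (b : Int × Int) j =>
        let left : Int := if j = 0 then 0 else PySem.List.pyGetD Z (j - 1) 0 + 1
        let right : Int := if k ≤ j + M then n - 1 else PySem.List.pyGetD Z (j + M) 0 - 1
        if b.2 - b.1 < right - left then (left, right) else b)
      ((0 : Int), (-1 : Int))
    PySem.List.pyRange bp.1 (bp.2 + 1) 1

-- ===== PRECONDITION & SPEC =====
def Spec_find_max_consecutives_1s (A : List Int) (M : Int) (out : List Int) : Prop := out = find_max_consecutives_1s_alt A M
instance (A : List Int) (M : Int) (out : List Int) : Decidable (Spec_find_max_consecutives_1s A M out) := by unfold Spec_find_max_consecutives_1s; infer_instance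

-- ===== CLAIM (what is proved, stated in full; the proofs are below) =====
def Claim_equal_find_max_consecutives_1s : Prop := ∀ (A : List Int) (M : Int), Dom_find_max_consecutives_1s A M → Spec_find_max_consecutives_1s A M (find_max_consecutives_1s A M)

-- ===== LEMMAS AND PROOFS =====

-- proof-only helpers: B's best-window accumulator and the candidate windows
def pvBstep (b w : Int × Int) : Int × Int := if b.2 - b.1 < w.2 - w.1 then w else b
def pvWleft (Z : List Int) (j : Nat) : Int := if j = 0 then 0 else Z.getD (j - 1) 0 + 1
def pvWright (Z : List Int) (m j : Nat) : Int := Z.getD (j + m) 0 - 1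
def pvWindows (Z : List Int) (m : Nat) : List (Int × Int) :=
  (List.range (Z.length - m)).map (fun j => (pvWleft Z j, pvWright Z m j))
def pvBpS (Z : List Int) (m : Nat) : Int × Int := (pvWindows Z m).foldl pvBstep (0, -1)
def pvSowS (Z : List Int) (m : Nat) : Int :=
  if Z.length ≤ m then 0 else Z.getD (Z.length - m - 1) 0 + 1

lemma pvZerosOf_snoc (L : List Int) (x : Int) :
    pvZerosOf (L ++ [x]) = pvZerosOf L ++ (if x = 0 then [(L.length : Int)] else []) := by
  unfold pvZerosOf
  rw [PySem.List.enumerate_append, List.filterMap_append]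
  congr 1
  by_cases h : x = 0 <;>
    simp [PySem.List.enumerate_cons, PySem.List.enumerate_nil, h]

lemma pvZerosOf_mem_iff (L : List Int) (j : Int) :
    j ∈ pvZerosOf L ↔ 0 ≤ j ∧ j < L.length ∧ L.getD j.toNat 1 = 0 := by
  unfold pvZerosOf
  simp only [List.mem_filterMap, PySem.List.mem_enumerate_iff]
  constructor
  · rintro ⟨p, ⟨k, hk, rfl⟩, hp⟩
    simp only [zero_add] at hp
    by_cases h : L[k] = 0
    · simp [h] at hp
      subst hp
      refine ⟨by positivity, by exact_mod_cast hk, ?_⟩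
      simp [List.getD_eq_getElem?_getD, List.getElem?_eq_getElem hk, h]
    · simp [h] at hp
  · rintro ⟨h0, hlt, hz⟩
    refine ⟨((j : Int), (0 : Int)), ⟨j.toNat, ?_, ?_⟩, ?_⟩
    · omega
    · have hjk : (j.toNat : Int) = j := Int.toNat_of_nonneg h0
      have hlt' : j.toNat < L.length := by omega
      rw [List.getD_eq_getElem?_getD, List.getElem?_eq_getElem hlt'] at hz
      simp at hz
      simp [hjk, hz]
    · simp

lemma pvZerosOf_sorted (L : List Int) : (pvZerosOf L).Pairwise (· < ·) := by
  unfold pvZerosOf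
  refine List.Pairwise.filterMap _ ?_ (PySem.List.pairwise_lt_enumerate L 0)
  rintro ⟨a1, a2⟩ ⟨b1, b2⟩ h x hx y hy
  simp only at hx hy
  split at hx <;> simp at hx
  split at hy <;> simp at hy
  subst hx; subst hy; exact h

lemma pvAdvance_eq (A : List Int) (fuel : Nat) (sow target : Int)
    (h0 : 0 ≤ sow) (hst : sow ≤ target) (hfuel : target - sow < fuel)
    (htz : PySem.List.pyGetD A target 0 = 0)
    (hgap : ∀ i : Int, sow ≤ i → i < target → PySem.List.pyGetD A i 0 ≠ 0) :
    pvAdvance A fuel sow = target + 1 := by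
  induction fuel generalizing sow with
  | zero => omega
  | succ fuel ih =>
    by_cases h : sow = target
    · subst h
      simp [pvAdvance, htz]
    · have hlt : sow < target := lt_of_le_of_ne hst h
      rw [pvAdvance, if_pos (hgap sow le_rfl hlt)]
      exact ih (sow + 1) (by omega) (by omega) (by omega)
        (fun i hi1 hi2 => hgap i (by omega) hi2)

-- after a new zero at index t, A's shrink loop lands one past the next zero
lemma pvSorted_getElem_le (Z : List Int) (h : Z.Pairwise (· < ·)) (i j : Nat)
    (hij : i ≤ j) (hj : j < Z.length) : Z[i]'(by omega) ≤ Z[j] := by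
  rcases Nat.lt_or_ge i j with h' | h'
  · exact le_of_lt ((List.pairwise_iff_getElem.mp h) i j (by omega) hj h')
  · have : i = j := by omega
    subst this; rfl

lemma pvNextZero (A : List Int) (t : Nat) (ht : t < A.length)
    (hx : A.getD t 1 = 0) (j : Nat) (hj : j ≤ (pvZerosOf (A.take t)).length) :
    pvAdvance A A.length (pvWleft (pvZerosOf (A.take t)) j)
      = ((pvZerosOf (A.take t)) ++ [(t : Int)]).getD j 0 + 1 := by
  set Z := pvZerosOf (A.take t) with hZ
  set Z' := Z ++ [(t : Int)] with hZ'
  have htake : A.take (t + 1) = A.take t ++ [A[t]] := by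
    rw [List.take_add_one, List.getElem?_eq_getElem ht]; rfl
  have hxt : A[t] = 0 := by
    rw [List.getD_eq_getElem?_getD, List.getElem?_eq_getElem ht] at hx
    simpa using hx
  have hlen : (A.take t).length = t := by simp; omega
  have hZ'eq : Z' = pvZerosOf (A.take (t + 1)) := by
    rw [htake, pvZerosOf_snoc, hxt, if_pos rfl, hlen]
  have hsorted : Z'.Pairwise (· < ·) := by rw [hZ'eq]; exact pvZerosOf_sorted _
  have hmem : ∀ i : Int, i ∈ Z' ↔ 0 ≤ i ∧ i < t + 1 ∧ A.getD i.toNat 1 = 0 := by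
    intro i
    rw [hZ'eq, pvZerosOf_mem_iff]
    have hlen1 : (A.take (t + 1)).length = t + 1 := by simp; omega
    rw [hlen1]
    constructor
    · rintro ⟨h1, h2, h3⟩
      refine ⟨h1, by exact_mod_cast h2, ?_⟩
      rwa [List.getD_eq_getElem?_getD, List.getElem?_take_of_lt (by omega),
        ← List.getD_eq_getElem?_getD] at h3
    · rintro ⟨h1, h2, h3⟩
      refine ⟨h1, by exact_mod_cast h2, ?_⟩
      rwa [List.getD_eq_getElem?_getD, List.getElem?_take_of_lt (by omega),
        ← List.getD_eq_getElem?_getD]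
  have hjlen : j < Z'.length := by simp [hZ']; omega
  have htarget : Z'.getD j 0 = Z'[j] := List.getD_eq_getElem Z' 0 hjlen
  have htmem : Z'[j] ∈ Z' := List.getElem_mem _
  have htfacts := (hmem _).mp htmem
  rw [htarget]
  apply pvAdvance_eq
  · -- 0 ≤ sow
    unfold pvWleft
    split
    · exact le_refl 0
    · rename_i hj0
      have hidx : j - 1 < Z.length := by omega
      have : Z.getD (j-1) 0 = Z[j-1] := List.getD_eq_getElem Z 0 hidx
      rw [this]
      have : Z[j-1] ∈ Z' := by
        rw [hZ']; exact List.mem_append_left _ (List.getElem_mem _)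
      have := (hmem _).mp this
      omega
  · -- sow ≤ target
    unfold pvWleft
    split
    · omega
    · rename_i hj0
      have hidx : j - 1 < Z.length := by omega
      have hg : Z.getD (j-1) 0 = Z'[j-1]'(by simp [hZ']; omega) := by
        show Z.getD (j-1) 0 = (Z ++ [(t : Int)])[j-1]'(by simp; omega)
        rw [List.getD_eq_getElem Z 0 hidx, List.getElem_append_left]
      rw [hg]
      have := (List.pairwise_iff_getElem.mp hsorted) (j-1) j (by omega) hjlen (by omega)
      omega
  · -- fuel
    unfold pvWleft
    split
    · omega
    · rename_i hj0
      have hidx : j - 1 < Z.length := by omega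
      have : Z.getD (j-1) 0 = Z[j-1] := List.getD_eq_getElem Z 0 hidx
      have hm : Z[j-1] ∈ Z' := by
        rw [hZ']; exact List.mem_append_left _ (List.getElem_mem _)
      have := (hmem _).mp hm
      omega
  · -- pyGetD A target 0 = 0
    have h1 := htfacts.1
    have h2 := htfacts.2.1
    have h3 := htfacts.2.2
    rw [PySem.List.pyGetD_eq_getElem A 0 h1 (by omega)]
    rw [List.getD_eq_getElem?_getD, List.getElem?_eq_getElem (by omega : Z'[j].toNat < A.length)] at h3
    simpa using h3
  · -- gap
    intro i hi1 hi2 hcon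
    have hi0 : 0 ≤ i := by
      unfold pvWleft at hi1
      split at hi1
      · omega
      · rename_i hj0
        have hidx : j - 1 < Z.length := by omega
        have : Z.getD (j-1) 0 = Z[j-1] := List.getD_eq_getElem Z 0 hidx
        have hm : Z[j-1] ∈ Z' := by
          rw [hZ']; exact List.mem_append_left _ (List.getElem_mem _)
        have := (hmem _).mp hm
        omega
    have hiA : A.getD i.toNat 1 = 0 := by
      rw [PySem.List.pyGetD_eq_getElem A 0 hi0 (by omega)] at hcon
      rw [List.getD_eq_getElem?_getD, List.getElem?_eq_getElem (by omega : i.toNat < A.length)]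
      simpa using hcon
    have hiZ : i ∈ Z' := (hmem i).mpr ⟨hi0, by omega, hiA⟩
    obtain ⟨l, hl, hli⟩ := List.mem_iff_getElem.mp hiZ
    rcases Nat.lt_or_ge l j with hlj | hlj
    · -- l < j: i ≤ Z'[j-1] < sow
      have hj0 : j ≠ 0 := by omega
      have hle : Z'[l] ≤ Z'[j-1]'(by omega) := pvSorted_getElem_le Z' hsorted l (j-1) (by omega) (by omega)
      unfold pvWleft at hi1
      rw [if_neg hj0] at hi1
      have hidx : j - 1 < Z.length := by omega
      have hg : Z.getD (j-1) 0 = Z'[j-1]'(by omega) := by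
        show Z.getD (j-1) 0 = (Z ++ [(t : Int)])[j-1]'(by simp; omega)
        rw [List.getD_eq_getElem Z 0 hidx, List.getElem_append_left]
      omega
    · have hge : Z'[j] ≤ Z'[l] := pvSorted_getElem_le Z' hsorted j l hlj hl
      omega

lemma pvWindows_snoc (Z : List Int) (z : Int) (m : Nat) (h : m ≤ Z.length) :
    pvWindows (Z ++ [z]) m
      = pvWindows Z m ++ [(pvWleft Z (Z.length - m), z - 1)] := by
  unfold pvWindows
  have hlen : (Z ++ [z]).length - m = (Z.length - m) + 1 := by simp; omega
  rw [hlen, List.range_succ, List.map_append]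
  congr 1
  · apply List.map_congr_left
    intro j hj
    have hj' : j < Z.length - m := List.mem_range.mp hj
    congr 1
    · unfold pvWleft
      split
      · rfl
      · rename_i hj0
        rw [List.getD_append _ _ _ _ (by omega)]
    · unfold pvWright
      rw [List.getD_append _ _ _ _ (by omega)]
  · simp only [List.map_cons, List.map_nil]
    congr 2
    · unfold pvWleft
      split
      · rfl
      · rename_i hj0
        rw [List.getD_append _ _ _ _ (by omega)]
    · unfold pvWright
      have : Z.length - m + m = Z.length := by omega
      rw [this]
      have : (Z ++ [z]).getD Z.length 0 = z := by
        rw [List.getD_eq_getElem?_getD]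
        simp
      rw [this]

-- loop invariant of A's pass, for M ≥ 0
lemma pvInvA (A : List Int) (M : Int) (hM : 0 ≤ M) (t : Nat) (ht : t ≤ A.length) :
    (A.take t).foldl (fun st x => pvStepA A st x) (0, -1, 0, 0, M)
      = (pvSowS (pvZerosOf (A.take t)) M.toNat, (t : Int) - 1,
         (pvBpS (pvZerosOf (A.take t)) M.toNat).1,
         (pvBpS (pvZerosOf (A.take t)) M.toNat).2 + 1,
         if (pvZerosOf (A.take t)).length ≤ M.toNat
           then M - (pvZerosOf (A.take t)).length else 0) := by
  have hMm : M = (M.toNat : Int) := (Int.toNat_of_nonneg hM).symm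
  set m := M.toNat with hm
  induction t with
  | zero =>
    simp [pvZerosOf, PySem.List.enumerate_nil, pvSowS, pvBpS, pvWindows]
  | succ t ih =>
    have ht' : t < A.length := by omega
    have htake : A.take (t + 1) = A.take t ++ [A[t]] := by
      rw [List.take_add_one, List.getElem?_eq_getElem ht']; rfl
    have hlen : (A.take t).length = t := by simp; omega
    rw [htake, List.foldl_append, ih (by omega)]
    set Z := pvZerosOf (A.take t) with hZ
    set c := Z.length with hc
    by_cases hx : A[t] = 0
    · have hZ' : pvZerosOf (A.take t ++ [A[t]]) = Z ++ [(t : Int)] := by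
        rw [pvZerosOf_snoc, hx, if_pos rfl, hlen]
      rw [hZ']
      have hlenZ' : (Z ++ [(t : Int)]).length = c + 1 := by simp [← hc]
      by_cases hcm : c < m
      · -- still swallowing zeros: M - c ≠ 0
        have hne : M - (c : Int) ≠ 0 := by omega
        have hcond : (if c ≤ m then M - (c : Int) else 0) = M - c := if_pos (by omega)
        simp only [List.foldl_cons, List.foldl_nil, pvStepA, hcond]
        rw [if_pos hx, if_neg hne]
        have hw : pvWindows (Z ++ [(t : Int)]) m = [] := by
          unfold pvWindows
          have : (Z ++ [(t : Int)]).length - m = 0 := by simp; omega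
          rw [this]; rfl
        have hw0 : pvWindows Z m = [] := by
          unfold pvWindows
          have : Z.length - m = 0 := by omega
          rw [this]; rfl
        have hbp : pvBpS (Z ++ [(t : Int)]) m = (0, -1) := by
          unfold pvBpS; rw [hw]; rfl
        have hbp0 : pvBpS Z m = (0, -1) := by
          unfold pvBpS; rw [hw0]; rfl
        rw [hbp, hbp0]
        have hs1 : pvSowS Z m = 0 := if_pos (by omega)
        have hs2 : pvSowS (Z ++ [(t : Int)]) m = 0 := by
          unfold pvSowS; rw [hlenZ']; exact if_pos (by omega)
        rw [hs1, hs2, hlenZ', if_pos (by omega : c + 1 ≤ m)]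
        simp only [Prod.mk.injEq]
        and_intros <;> first | rfl | trivial | (push_cast; ring)
      · -- window full: the m = 0 branch fires
        have hcm' : m ≤ c := by omega
        have hmzero : (if c ≤ m then M - (c : Int) else 0) = 0 := by
          by_cases h : c ≤ m
          · rw [if_pos h]; omega
          · rw [if_neg h]
        simp only [List.foldl_cons, List.foldl_nil, pvStepA, hmzero]
        rw [if_pos hx]
        simp only [if_true]
        -- new sow via the shrink loop
        have hxd : A.getD t 1 = 0 := by
          rw [List.getD_eq_getElem?_getD, List.getElem?_eq_getElem ht']
          simpa using hx
        have hsow_eq : pvSowS Z m = pvWleft Z (c - m) := by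
          unfold pvSowS pvWleft
          by_cases h : c ≤ m
          · rw [if_pos h, if_pos (by omega)]
          · rw [if_neg h, if_neg (by omega)]
        have hadv : pvAdvance A A.length (pvSowS Z m) = (Z ++ [(t : Int)]).getD (c - m) 0 + 1 := by
          rw [hsow_eq]
          exact pvNextZero A t ht' hxd (c - m) (by rw [← hZ]; omega)
        have hsow' : pvSowS (Z ++ [(t : Int)]) m = (Z ++ [(t : Int)]).getD (c - m) 0 + 1 := by
          unfold pvSowS
          rw [hlenZ', if_neg (by omega)]
          congr 2
          omega
        -- new best pair via windows snoc
        have hbp' : pvBpS (Z ++ [(t : Int)]) m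
            = pvBstep (pvBpS Z m) (pvWleft Z (c - m), (t : Int) - 1) := by
          unfold pvBpS
          rw [pvWindows_snoc Z _ m hcm', List.foldl_append]
          rfl
        rw [hadv, hsow', hbp', hlenZ', if_neg (by omega : ¬ c + 1 ≤ m)]
        -- compare the two update conditions
        rw [← hsow_eq]
        unfold pvBstep
        set bp := pvBpS Z m with hbp
        by_cases hcond : bp.2 + 1 - bp.1 < (t : Int) - 1 + 1 - pvSowS Z m
        · rw [if_pos hcond, if_pos (by omega)]
          simp only [Prod.mk.injEq]
          and_intros <;> first | rfl | trivial | (push_cast; ring)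
        · rw [if_neg hcond, if_neg (by omega)]
          simp only [Prod.mk.injEq]
          and_intros <;> first | rfl | trivial | (push_cast; ring)
    · have hZ' : pvZerosOf (A.take t ++ [A[t]]) = Z := by
        rw [pvZerosOf_snoc, if_neg hx, List.append_nil]
      rw [hZ']
      simp only [List.foldl_cons, List.foldl_nil, pvStepA]
      rw [if_neg hx]
      simp only [Prod.mk.injEq]
      and_intros <;> first | rfl | trivial | (push_cast; ring)

-- loop invariant of A's pass, for M < 0: the M == 0 branch never fires
lemma pvInvNeg (A : List Int) (M : Int) (hM : M < 0) (t : Nat) (ht : t ≤ A.length) :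
    (A.take t).foldl (fun st x => pvStepA A st x) (0, -1, 0, 0, M)
      = (0, (t : Int) - 1, 0, 0, M - (pvZerosOf (A.take t)).length) := by
  induction t with
  | zero =>
    simp [pvZerosOf, PySem.List.enumerate_nil]
  | succ t ih =>
    have ht' : t < A.length := by omega
    have htake : A.take (t + 1) = A.take t ++ [A[t]] := by
      rw [List.take_add_one, List.getElem?_eq_getElem ht']; rfl
    have hlen : (A.take t).length = t := by simp; omega
    rw [htake, List.foldl_append, ih (by omega)]
    set Z := pvZerosOf (A.take t) with hZ
    by_cases hx : A[t] = 0
    · have hZ' : pvZerosOf (A.take t ++ [A[t]]) = Z ++ [(t : Int)] := by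
        rw [pvZerosOf_snoc, hx, if_pos rfl, hlen]
      rw [hZ']
      simp only [List.foldl_cons, List.foldl_nil, pvStepA]
      rw [if_pos hx, if_neg (by omega : M - (Z.length : Int) ≠ 0)]
      simp only [Prod.mk.injEq, List.length_append, List.length_cons, List.length_nil]
      and_intros <;> first | rfl | trivial | (push_cast; ring)
    · have hZ' : pvZerosOf (A.take t ++ [A[t]]) = Z := by
        rw [pvZerosOf_snoc, if_neg hx, List.append_nil]
      rw [hZ']
      simp only [List.foldl_cons, List.foldl_nil, pvStepA]
      rw [if_neg hx]
      simp only [Prod.mk.injEq]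
      and_intros <;> first | rfl | trivial | (push_cast; ring)

-- B's fold over range(k - M + 1) = interior-windows fold, then the final window
lemma pvFoldB (Z : List Int) (n : Int) (M : Int) (hM : 0 ≤ M)
    (hk : M.toNat < Z.length) :
    (PySem.List.pyRange 0 ((Z.length : Int) - M + 1) 1).foldl
      (fun (b : Int × Int) j =>
        let left : Int := if j = 0 then 0 else PySem.List.pyGetD Z (j - 1) 0 + 1
        let right : Int := if (Z.length : Int) ≤ j + M then n - 1
                           else PySem.List.pyGetD Z (j + M) 0 - 1
        if b.2 - b.1 < right - left then (left, right) else b)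
      ((0 : Int), (-1 : Int))
    = pvBstep (pvBpS Z M.toNat) (pvSowS Z M.toNat, n - 1) := by
  have hMm : M = (M.toNat : Int) := (Int.toNat_of_nonneg hM).symm
  set m := M.toNat with hm
  set k := Z.length with hk'
  set c := k - m with hc
  have hcast : (k : Int) - M + 1 = (c : Int) + 1 := by omega
  rw [hcast, PySem.List.pyRange_one_succ_right (by positivity), List.foldl_append,
    PySem.List.pyRange_zero_nat c]
  rw [List.foldl_map]
  have hbody : ∀ (b : Int × Int), ∀ j ∈ List.range c,
      (fun (b : Int × Int) (j : Nat) =>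
        (fun (b : Int × Int) (j : Int) =>
          let left : Int := if j = 0 then 0 else PySem.List.pyGetD Z (j - 1) 0 + 1
          let right : Int := if (k : Int) ≤ j + M then n - 1
                             else PySem.List.pyGetD Z (j + M) 0 - 1
          if b.2 - b.1 < right - left then (left, right) else b) b (j : Int)) b j
      = pvBstep b (pvWleft Z j, pvWright Z m j) := by
    intro b j hj
    have hj' : j < c := List.mem_range.mp hj
    simp only
    have hleft : (if (j : Int) = 0 then (0:Int) else PySem.List.pyGetD Z ((j:Int) - 1) 0 + 1)
        = pvWleft Z j := by
      unfold pvWleft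
      by_cases h : j = 0
      · subst h; norm_num
      · rw [if_neg (by exact_mod_cast h), if_neg h]
        have : (j : Int) - 1 = ((j - 1 : Nat) : Int) := by omega
        rw [this, PySem.List.pyGetD_natCast]
    have hright : (if (k : Int) ≤ (j:Int) + M then n - 1
        else PySem.List.pyGetD Z ((j:Int) + M) 0 - 1) = pvWright Z m j := by
      rw [if_neg (by omega)]
      unfold pvWright
      have : (j : Int) + M = ((j + m : Nat) : Int) := by omega
      rw [this, PySem.List.pyGetD_natCast]
    rw [hleft, hright]
    rfl
  rw [PySem.List.foldl_congr_mem (List.range c) _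
    (fun b j => pvBstep b (pvWleft Z j, pvWright Z m j)) (0, -1) hbody]
  have hfold : List.foldl (fun (b : Int × Int) j => pvBstep b (pvWleft Z j, pvWright Z m j))
      (0, -1) (List.range c) = pvBpS Z m := by
    unfold pvBpS pvWindows
    rw [List.foldl_map]
  rw [hfold]
  simp only [List.foldl_cons, List.foldl_nil]
  have hc1 : 1 ≤ c := by omega
  have hleft : (if (c : Int) = 0 then (0:Int) else PySem.List.pyGetD Z ((c:Int) - 1) 0 + 1)
      = pvSowS Z m := by
    rw [if_neg (by omega : ¬ (c : Int) = 0)]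
    unfold pvSowS
    rw [if_neg (by omega : ¬ k ≤ m)]
    have : (c : Int) - 1 = ((k - m - 1 : Nat) : Int) := by omega
    rw [this, PySem.List.pyGetD_natCast]
  have hright : (if (k : Int) ≤ (c:Int) + M then n - 1
      else PySem.List.pyGetD Z ((c:Int) + M) 0 - 1) = n - 1 := by
    rw [if_pos (by omega)]
  rw [hleft, hright]
  rfl

lemma pvMain (A : List Int) (M : Int) :
    find_max_consecutives_1s A M = find_max_consecutives_1s_alt A M := by
  by_cases hM : M < 0
  · have hinv := pvInvNeg A M hM A.length le_rfl
    rw [List.take_length] at hinv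
    simp only [find_max_consecutives_1s, find_max_consecutives_1s_alt]
    rw [hinv, if_pos (Or.inl hM)]
    dsimp only
    by_cases hn : (0:Int) - 0 < (A.length : Int) - 1 - 0 + 1
    · rw [if_pos hn]
      congr 1
      ring
    · rw [if_neg hn]
      have h0 : (A.length : Int) = 0 := by omega
      rw [h0]
  · push Not at hM
    have hinv := pvInvA A M hM A.length le_rfl
    rw [List.take_length] at hinv
    set Z := pvZerosOf A with hZ
    set k := Z.length with hk
    set m := M.toNat with hm
    have hMm : M = (m : Int) := (Int.toNat_of_nonneg hM).symm
    by_cases hkM : k ≤ m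
    · have hsow : pvSowS Z m = 0 := if_pos hkM
      have hbp : pvBpS Z m = (0, -1) := by
        unfold pvBpS pvWindows
        have h0 : k - m = 0 := by omega
        rw [← hk, h0]
        rfl
      have hguard : M < 0 ∨ (k : Int) ≤ M := Or.inr (by omega)
      simp only [find_max_consecutives_1s, find_max_consecutives_1s_alt]
      rw [hinv, hsow, hbp, if_pos hguard]
      dsimp only
      by_cases hn : (-1 : Int) + 1 - 0 < (A.length : Int) - 1 - 0 + 1
      · rw [if_pos hn]
        congr 1
        ring
      · rw [if_neg hn]
        have h0 : (A.length : Int) = 0 := by omega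
        rw [h0]
        norm_num
    · have hmk : m < k := by omega
      have hfoldB := pvFoldB Z (A.length : Int) M hM (by omega)
      have hguard : ¬ (M < 0 ∨ (k : Int) ≤ M) := by
        push Not
        exact ⟨hM, by omega⟩
      simp only [find_max_consecutives_1s, find_max_consecutives_1s_alt]
      rw [hinv, if_neg hguard]
      rw [← hk] at hfoldB ⊢
      rw [hfoldB]
      unfold pvBstep
      dsimp only
      by_cases hcond : (pvBpS Z m).2 + 1 - (pvBpS Z m).1
          < (A.length : Int) - 1 - pvSowS Z m + 1
      · rw [if_pos hcond, if_pos (by omega : (pvBpS Z m).2 - (pvBpS Z m).1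
            < (A.length : Int) - 1 - pvSowS Z m)]
      · rw [if_neg hcond, if_neg (by omega : ¬ (pvBpS Z m).2 - (pvBpS Z m).1
            < (A.length : Int) - 1 - pvSowS Z m)]

-- ===== VERDICT (by name: the statement is the Claim_ definition above) =====
theorem find_max_consecutives_1s_spec : Claim_equal_find_max_consecutives_1s := by
  intro A M _
  exact pvMain A M
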